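-- pv_equiv track=rewrite | github.com/quan118/aoc2020 | day16_ticket_translation.py | is_valid_ticket
-- ===== SOURCE A (Python) =====
-- def is_valid_ticket(merged_ranges, ticket):
--   rate = 0
--   is_valid = True
--   for num in ticket:
--     found = False
--     for r in merged_ranges:
--       if r[0]<=num and num<=r[1]:
--         found = True
--         break
--     if not found:
--       rate += num
--       is_valid = False
--   return (is_valid,rate)
-- ===== SOURCE B (Python) =====
-- def is_valid_ticket(merged_ranges, ticket):
--   # Sort ranges by start, merge overlapping ones once, then binary-search
--   # each number for the last merged range whose start <= num.
--   rs = sorted(merged_ranges, key=lambda r: r[0])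
--   merged = []
--   if rs:
--     cur = rs[0]
--     for lo, hi in rs[1:]:
--       if lo <= cur[1]:
--         if hi > cur[1]:
--           cur = (cur[0], hi)
--       else:
--         merged.append(cur)
--         cur = (lo, hi)
--     merged.append(cur)
--
--   def covered(num):
--     lo, hi = 0, len(merged)
--     best = None
--     while lo < hi:
--       mid = (lo + hi) // 2
--       if merged[mid][0] <= num:
--         best = merged[mid]
--         lo = mid + 1
--       else:
--         hi = mid
--     return best is not None and num <= best[1]
--
--   rate = 0
--   is_valid = True
--   for num in ticket:
--     if not covered(num):
--       rate += num
--       is_valid = False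
--   return (is_valid, rate)
-- ===== Notes on version B (the rewrite author's own statement) =====
-- stated objective: faster
-- what changed: B sorts the ranges once, merges them into disjoint increasing intervals, and decides each ticket number by binary search over the merged list instead of A's linear scan of all ranges per number.
import Mathlib
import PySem

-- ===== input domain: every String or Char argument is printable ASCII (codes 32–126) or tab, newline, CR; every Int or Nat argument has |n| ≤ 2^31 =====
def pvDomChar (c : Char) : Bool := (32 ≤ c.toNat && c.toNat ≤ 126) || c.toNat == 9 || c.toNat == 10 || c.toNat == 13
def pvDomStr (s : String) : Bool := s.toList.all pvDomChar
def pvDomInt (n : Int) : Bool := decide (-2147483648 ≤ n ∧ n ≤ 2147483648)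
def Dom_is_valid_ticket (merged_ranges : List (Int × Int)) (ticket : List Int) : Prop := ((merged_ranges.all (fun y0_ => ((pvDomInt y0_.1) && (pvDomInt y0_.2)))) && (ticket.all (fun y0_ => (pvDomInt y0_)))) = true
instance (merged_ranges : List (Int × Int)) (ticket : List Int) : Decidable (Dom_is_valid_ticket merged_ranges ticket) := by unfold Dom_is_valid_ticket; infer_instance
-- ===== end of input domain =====

-- B replaces A's per-number linear scan of the range list by a one-time sort+merge
-- of the ranges followed by a binary search per ticket number (objective: faster).

-- ===== PORT A =====
-- inner 'for r in merged_ranges: … break' loop of A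
def pvInnerA (merged_ranges : List (Int × Int)) (num : Int) : Bool :=
  match merged_ranges with
  | [] => false
  | r :: t => if r.1 ≤ num ∧ num ≤ r.2 then true else pvInnerA t num

def is_valid_ticket (merged_ranges : List (Int × Int)) (ticket : List Int) : Bool × Int :=
  ticket.foldl
    (fun (st : Bool × Int) num =>
      if pvInnerA merged_ranges num then st else (false, st.2 + num))
    (true, 0)

-- ===== PORT B =====
-- the 'for lo, hi in rs[1:]' merge loop of Source B, with 'cur' threaded and the final append
def pvMergeGo (cur : Int × Int) (rs : List (Int × Int)) : List (Int × Int) :=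
  match rs with
  | [] => [cur]
  | (lo, hi) :: t =>
      if lo ≤ cur.2 then
        pvMergeGo (cur.1, if hi > cur.2 then hi else cur.2) t
      else
        cur :: pvMergeGo (lo, hi) t

def pvMergeRanges (rs : List (Int × Int)) : List (Int × Int) :=
  match rs with
  | [] => []
  | c :: t => pvMergeGo c t

-- the 'while lo < hi' binary-search loop of Source B's covered()
def pvBsGo (merged : List (Int × Int)) (num : Int) (lo hi : Nat) (best : Option (Int × Int)) :
    Option (Int × Int) :=
  if h : lo < hi then
    let mid := (lo + hi) / 2
    let p := merged.getD mid (0, 0)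
    if p.1 ≤ num then pvBsGo merged num (mid + 1) hi (some p)
    else pvBsGo merged num lo mid best
  else best
termination_by hi - lo
decreasing_by all_goals omega

def pvCovered (merged : List (Int × Int)) (num : Int) : Bool :=
  match pvBsGo merged num 0 merged.length none with
  | some p => decide (num ≤ p.2)
  | none => false

def is_valid_ticket_alt (merged_ranges : List (Int × Int)) (ticket : List Int) : Bool × Int :=
  let rs := PySem.List.sorted merged_ranges (fun r => r.1) false
  let merged := pvMergeRanges rs
  ticket.foldl
    (fun (st : Bool × Int) num =>
      if pvCovered merged num then st else (false, st.2 + num))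
    (true, 0)

-- ===== PRECONDITION & SPEC =====
def Spec_is_valid_ticket (merged_ranges : List (Int × Int)) (ticket : List Int) (out : Bool × Int) : Prop := out = is_valid_ticket_alt merged_ranges ticket
instance (merged_ranges : List (Int × Int)) (ticket : List Int) (out : Bool × Int) : Decidable (Spec_is_valid_ticket merged_ranges ticket out) := by unfold Spec_is_valid_ticket; infer_instance

-- ===== CLAIM (what is proved, stated in full; the proofs are below) =====
def Claim_equal_is_valid_ticket : Prop := ∀ (merged_ranges : List (Int × Int)) (ticket : List Int), Dom_is_valid_ticket merged_ranges ticket → Spec_is_valid_ticket merged_ranges ticket (is_valid_ticket merged_ranges ticket)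

-- ===== LEMMAS AND PROOFS =====

-- "some range of l covers num"
def pvAnyCover (l : List (Int × Int)) (num : Int) : Bool :=
  l.any (fun r => decide (r.1 ≤ num) && decide (num ≤ r.2))

theorem pvInnerA_eq_anyCover (l : List (Int × Int)) (num : Int) :
    pvInnerA l num = pvAnyCover l num := by
  induction l with
  | nil => rfl
  | cons r t ih =>
      simp only [pvInnerA, pvAnyCover, List.any_cons] at *
      by_cases h : r.1 ≤ num ∧ num ≤ r.2
      · simp [h]
      · rw [if_neg h, ih]
        rcases not_and_or.mp h with h1 | h1 <;> simp [h1]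

theorem pvAnyCover_perm {l₁ l₂ : List (Int × Int)} (h : l₁.Perm l₂) (num : Int) :
    pvAnyCover l₁ num = pvAnyCover l₂ num := by
  unfold pvAnyCover; exact h.any_eq

-- everything mergeGo produces starts at or after cur.1
theorem pvMergeGo_start (cur : Int × Int) (t : List (Int × Int))
    (hs : t.Pairwise (fun a b => a.1 ≤ b.1))
    (hle : ∀ r ∈ t, cur.1 ≤ r.1) :
    ∀ x ∈ pvMergeGo cur t, cur.1 ≤ x.1 := by
  induction t generalizing cur with
  | nil => intro x hx; simp [pvMergeGo] at hx; simp [hx]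
  | cons r t ih =>
      intro x hx
      obtain ⟨lo, hi⟩ := r
      rw [List.pairwise_cons] at hs
      have hlo : cur.1 ≤ lo := hle (lo, hi) (by simp)
      simp only [pvMergeGo] at hx
      split at hx
      · exact ih (cur.1, if hi > cur.2 then hi else cur.2) hs.2
          (fun q hq => le_trans hlo (hs.1 q hq)) x hx
      · rcases List.mem_cons.mp hx with h | h
        · simp [h]
        · exact le_trans hlo (ih (lo, hi) hs.2 (fun q hq => hs.1 q hq) x h)

-- coverage is preserved by the merge loop
theorem pvMergeGo_cover (num : Int) (cur : Int × Int) (t : List (Int × Int))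
    (hs : t.Pairwise (fun a b => a.1 ≤ b.1))
    (hle : ∀ r ∈ t, cur.1 ≤ r.1) :
    pvAnyCover (pvMergeGo cur t) num
      = ((decide (cur.1 ≤ num) && decide (num ≤ cur.2)) || pvAnyCover t num) := by
  induction t generalizing cur with
  | nil => simp [pvMergeGo, pvAnyCover]
  | cons r t ih =>
      obtain ⟨lo, hi⟩ := r
      rw [List.pairwise_cons] at hs
      have hlo : cur.1 ≤ lo := hle (lo, hi) (by simp)
      simp only [pvMergeGo]
      split
      · rename_i hmerge
        rw [ih (cur.1, if hi > cur.2 then hi else cur.2) hs.2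
              (fun q hq => le_trans hlo (hs.1 q hq))]
        simp only [pvAnyCover, List.any_cons, ← Bool.or_assoc]
        congr 1
        apply Bool.eq_iff_iff.mpr
        simp only [Bool.and_eq_true, Bool.or_eq_true, decide_eq_true_eq]
        split_ifs with h4 <;> omega
      · rw [pvAnyCover, List.any_cons, ← pvAnyCover,
            ih (lo, hi) hs.2 (fun q hq => hs.1 q hq)]
        simp [pvAnyCover, List.any_cons]

-- merged output is separated: starts nondecreasing, each end before every later start
theorem pvMergeGo_sep (cur : Int × Int) (t : List (Int × Int))
    (hs : t.Pairwise (fun a b => a.1 ≤ b.1))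
    (hle : ∀ r ∈ t, cur.1 ≤ r.1) :
    (pvMergeGo cur t).Pairwise (fun a b => a.1 ≤ b.1 ∧ a.2 < b.1) := by
  induction t generalizing cur with
  | nil => simp [pvMergeGo]
  | cons r t ih =>
      obtain ⟨lo, hi⟩ := r
      rw [List.pairwise_cons] at hs
      have hlo : cur.1 ≤ lo := hle (lo, hi) (by simp)
      simp only [pvMergeGo]
      split
      · exact ih (cur.1, if hi > cur.2 then hi else cur.2) hs.2
          (fun q hq => le_trans hlo (hs.1 q hq))
      · rename_i hnew
        rw [not_le] at hnew
        rw [List.pairwise_cons]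
        constructor
        · intro x hx
          have hst := pvMergeGo_start (lo, hi) t hs.2 (fun q hq => hs.1 q hq) x hx
          exact ⟨le_trans hlo hst, lt_of_lt_of_le hnew hst⟩
        · exact ih (lo, hi) hs.2 (fun q hq => hs.1 q hq)

-- binary-search loop correctness under the separation invariant
theorem pvBsGo_correct (l : List (Int × Int)) (num : Int)
    (hsep : l.Pairwise (fun a b => a.1 ≤ b.1 ∧ a.2 < b.1)) :
    ∀ n lo hi best, hi - lo = n → lo ≤ hi → hi ≤ l.length →
      (∀ i, i < lo → i < l.length → (l.getD i (0, 0)).1 ≤ num) →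
      (∀ i, hi ≤ i → i < l.length → num < (l.getD i (0, 0)).1) →
      ((best = none ∧ lo = 0) ∨
        (∃ p, best = some p ∧ 0 < lo ∧ l.getD (lo - 1) (0, 0) = p)) →
      (match pvBsGo l num lo hi best with
        | some p => decide (num ≤ p.2)
        | none => false) = pvAnyCover l num := by
  have hpw := List.pairwise_iff_getElem.mp hsep
  intro n
  induction n using Nat.strong_induction_on with
  | _ n ihn =>
  intro lo hi best hn hlohi hhil Hlow Hhigh Hbest
  rw [pvBsGo]
  by_cases h : lo < hi
  · rw [dif_pos h]
    simp only
    have hmidlt : (lo + hi) / 2 < l.length := by omega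
    by_cases hp : (l.getD ((lo + hi) / 2) (0, 0)).1 ≤ num
    · rw [if_pos hp]
      refine ihn (hi - ((lo + hi) / 2 + 1)) (by omega) ((lo + hi) / 2 + 1) hi _ rfl
        (by omega) hhil ?_ Hhigh ?_
      · intro i hi1 hi2
        rcases Nat.lt_or_ge i ((lo + hi) / 2) with hc | hc
        · have := hpw i ((lo + hi) / 2) hi2 hmidlt hc
          rw [List.getD_eq_getElem _ _ hi2, List.getD_eq_getElem _ _ hmidlt] at *
          exact le_trans this.1 hp
        · have : i = (lo + hi) / 2 := by omega
          rw [this]; exact hp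
      · exact Or.inr ⟨_, rfl, by omega, by simp⟩
    · rw [if_neg hp]
      refine ihn ((lo + hi) / 2 - lo) (by omega) lo ((lo + hi) / 2) best rfl
        (by omega) (by omega) Hlow ?_ Hbest
      intro i hi1 hi2
      rw [not_le] at hp
      rcases Nat.lt_or_ge ((lo + hi) / 2) i with hc | hc
      · have := hpw ((lo + hi) / 2) i hmidlt hi2 hc
        rw [List.getD_eq_getElem _ _ hi2, List.getD_eq_getElem _ _ hmidlt] at *
        exact lt_of_lt_of_le hp this.1
      · have : i = (lo + hi) / 2 := by omega
        rw [this]; exact hp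
  · rw [dif_neg h]
    have hlh : lo = hi := by omega
    rcases Hbest with ⟨hb, hl0⟩ | ⟨p, hb, hl0, hgp⟩
    · subst hb
      simp only
      symm
      rw [pvAnyCover]
      simp only [List.any_eq_false]
      intro r hr
      obtain ⟨i, hilen, hri⟩ := List.mem_iff_getElem.mp hr
      have := Hhigh i (by omega) hilen
      rw [List.getD_eq_getElem _ _ hilen, hri] at this
      simp; omega
    · subst hb
      simp only
      have hlo1 : lo - 1 < l.length := by omega
      have hp1 : p.1 ≤ num := by
        have := Hlow (lo - 1) (by omega) hlo1
        rwa [hgp] at this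
      by_cases hcov : num ≤ p.2
      · rw [decide_eq_true hcov]
        symm
        rw [pvAnyCover, List.any_eq_true]
        refine ⟨p, ?_, by simp [hp1, hcov]⟩
        rw [← hgp, List.getD_eq_getElem _ _ hlo1]
        exact List.getElem_mem _
      · rw [decide_eq_false hcov]
        symm
        rw [pvAnyCover]
        simp only [List.any_eq_false]
        intro r hr
        obtain ⟨i, hilen, hri⟩ := List.mem_iff_getElem.mp hr
        rcases Nat.lt_or_ge i lo with hc | hc
        · rcases Nat.lt_or_ge i (lo - 1) with hc2 | hc2
          · have := hpw i (lo - 1) hilen hlo1 hc2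
            rw [hri] at this
            rw [List.getD_eq_getElem _ _ hlo1] at hgp
            rw [hgp] at this
            simp; omega
          · have : i = lo - 1 := by omega
            subst this
            rw [List.getD_eq_getElem _ _ hlo1, hri] at hgp
            subst hgp
            simp; omega
        · have := Hhigh i (by omega) hilen
          rw [List.getD_eq_getElem _ _ hilen, hri] at this
          simp; omega

-- per-number agreement of the two membership tests
theorem pvCovered_eq (merged_ranges : List (Int × Int)) (num : Int) :
    pvCovered (pvMergeRanges (PySem.List.sorted merged_ranges (fun r => r.1) false)) num
      = pvInnerA merged_ranges num := by
  rw [pvInnerA_eq_anyCover]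
  have hperm : (PySem.List.sorted merged_ranges (fun r => r.1) false).Perm merged_ranges :=
    PySem.List.sorted_perm _ _ _
  rw [← pvAnyCover_perm hperm]
  have hpw : (PySem.List.sorted merged_ranges (fun r => r.1) false).Pairwise
      (fun a b => a.1 ≤ b.1) := PySem.List.sorted_pairwise _ _
  set rs := PySem.List.sorted merged_ranges (fun r => r.1) false with hrs
  clear_value rs
  clear hperm hrs
  match rs with
  | [] =>
      unfold pvCovered pvMergeRanges
      rw [pvBsGo]
      simp [pvAnyCover]
  | c :: t =>
      rw [List.pairwise_cons] at hpw
      have hsep := pvMergeGo_sep c t hpw.2 hpw.1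
      have hcov := pvMergeGo_cover num c t hpw.2 hpw.1
      unfold pvCovered pvMergeRanges
      rw [pvBsGo_correct (pvMergeGo c t) num hsep _ 0 _ none rfl (by omega) le_rfl
          (by omega) (by intro i h1 h2; omega) (Or.inl ⟨rfl, rfl⟩)]
      rw [hcov]
      simp [pvAnyCover]

-- the two folds agree once the per-number tests agree
theorem pvFold_congr (c1 c2 : Int → Bool) (hc : ∀ n, c1 n = c2 n) :
    ∀ (t : List Int) (st : Bool × Int),
      t.foldl (fun (st : Bool × Int) num => if c1 num then st else (false, st.2 + num)) st
        = t.foldl (fun (st : Bool × Int) num => if c2 num then st else (false, st.2 + num)) st := by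
  intro t st
  simp only [hc]

-- ===== VERDICT (by name: the statement is the Claim_ definition above) =====
theorem is_valid_ticket_spec : Claim_equal_is_valid_ticket := by
  intro merged_ranges ticket _
  unfold Spec_is_valid_ticket is_valid_ticket is_valid_ticket_alt
  simp only
  exact pvFold_congr _ _ (fun n => (pvCovered_eq merged_ranges n).symm) ticket (true, 0)
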